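-- pv_equiv track=rewrite | github.com/hemanthmalla/firedex | firedex-static/firedex-coordinator-service/algorithms/network_flows/network_flow_greedy_split.py | __even_group_split
-- ===== SOURCE A (Python) =====
-- def __even_group_split(subscriptions, groups):
--     groups_size = []
--     base_size = subscriptions.__len__() // groups
--     surplus = subscriptions.__len__() % groups
--
--     for i in range(groups):
--         group_size = base_size
--         if i < surplus:
--             group_size = group_size + 1
--         groups_size.append(group_size)
--
--     grouped_subscriptions = []
--
--     index = 0
--     for i in range(groups):
--         group_size = groups_size[i]
--         grouped_subscriptions.append(subscriptions[index:index + group_size])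
--         index = index + group_size
--
--     return grouped_subscriptions
-- ===== SOURCE B (Python) =====
-- def __even_group_split(subscriptions, groups):
--     base = len(subscriptions) // groups
--     surplus = len(subscriptions) % groups
--     return [subscriptions[i * base + min(i, surplus):(i + 1) * base + min(i + 1, surplus)]
--             for i in range(groups)]
-- ===== Notes on version B (the rewrite author's own statement) =====
-- stated objective: simpler
-- what changed: Replaces the two-pass structure (build a sizes list, then slice with a running index) by a single stateless comprehension computing each slice's boundaries in closed form: start = i*base + min(i, surplus), end = (i+1)*base + min(i+1, surplus); groups == 0 (where both raise ZeroDivisionError) is excluded by Pre_.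
import Mathlib
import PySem

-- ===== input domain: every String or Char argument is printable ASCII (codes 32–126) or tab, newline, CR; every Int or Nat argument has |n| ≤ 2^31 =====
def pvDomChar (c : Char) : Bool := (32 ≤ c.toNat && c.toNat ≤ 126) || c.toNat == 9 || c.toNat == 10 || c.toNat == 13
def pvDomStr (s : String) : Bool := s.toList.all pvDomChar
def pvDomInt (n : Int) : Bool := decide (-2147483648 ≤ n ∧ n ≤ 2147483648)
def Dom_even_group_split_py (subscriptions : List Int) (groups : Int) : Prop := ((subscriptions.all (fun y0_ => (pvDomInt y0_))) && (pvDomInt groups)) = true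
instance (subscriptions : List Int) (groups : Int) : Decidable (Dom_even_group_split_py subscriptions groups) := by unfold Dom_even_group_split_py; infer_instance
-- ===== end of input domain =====

-- B replaces A's two passes (sizes list, then slicing with a running index) by one stateless
-- pass computing each slice's boundaries in closed form; objective: simpler, same cost.

-- ===== PORT A =====
def even_group_split_py (subscriptions : List Int) (groups : Int) : List (List Int) :=
  let base_size := PySem.Int.floordiv (subscriptions.length : Int) groups
  let surplus := PySem.Int.mod (subscriptions.length : Int) groups
  let groups_size : List Int :=
    (PySem.List.pyRange 0 groups 1).foldl
      (fun acc i => acc ++ [if i < surplus then base_size + 1 else base_size]) []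
  -- groups_size[i]: every i in range(groups) is in range (groups_size has exactly groups elements), so pyGetD is exact here
  let st :=
    (PySem.List.pyRange 0 groups 1).foldl
      (fun (st : List (List Int) × Int) i =>
        let gs := PySem.List.pyGetD groups_size i 0
        (st.1 ++ [PySem.List.slice subscriptions (some st.2) (some (st.2 + gs))], st.2 + gs))
      ([], 0)
  st.1

-- ===== PORT B =====
def even_group_split_py_alt (subscriptions : List Int) (groups : Int) : List (List Int) :=
  let base := PySem.Int.floordiv (subscriptions.length : Int) groups
  let surplus := PySem.Int.mod (subscriptions.length : Int) groups
  (PySem.List.pyRange 0 groups 1).map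
    (fun i => PySem.List.slice subscriptions
      (some (i * base + min i surplus))
      (some ((i + 1) * base + min (i + 1) surplus)))

-- ===== PRECONDITION & SPEC =====
-- groups = 0 makes the very first '//' raise ZeroDivisionError in both A and B.
def Pre_even_group_split_py (subscriptions : List Int) (groups : Int) : Prop := groups ≠ 0
instance (subscriptions : List Int) (groups : Int) : Decidable (Pre_even_group_split_py subscriptions groups) := by unfold Pre_even_group_split_py; infer_instance

def pvWitness_even_group_split_py : List Int × Int := ([1, 2, 3, 4, 5], 2)

def Spec_even_group_split_py (subscriptions : List Int) (groups : Int) (out : List (List Int)) : Prop := out = even_group_split_py_alt subscriptions groups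
instance (subscriptions : List Int) (groups : Int) (out : List (List Int)) : Decidable (Spec_even_group_split_py subscriptions groups out) := by unfold Spec_even_group_split_py; infer_instance

-- ===== CLAIM (what is proved, stated in full; the proofs are below) =====
def Claim_equal_even_group_split_py : Prop := ∀ (subscriptions : List Int) (groups : Int), Dom_even_group_split_py subscriptions groups → Pre_even_group_split_py subscriptions groups → Spec_even_group_split_py subscriptions groups (even_group_split_py subscriptions groups)

-- ===== LEMMAS AND PROOFS =====

-- A's first loop (append into an accumulator) is the map of the size function over the range.
theorem pv_foldl_append_map {α β : Type} (f : α → β) :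
    ∀ (l : List α) (acc : List β),
      l.foldl (fun a i => a ++ [f i]) acc = acc ++ l.map f := by
  intro l
  induction l with
  | nil => intro acc; simp
  | cons x xs ih => intro acc; simp [List.foldl, ih]

-- The closed-form start position of group i.
def pvPos (base surplus i : Int) : Int := i * base + min i surplus

theorem pvPos_zero (base surplus : Int) (hs : 0 ≤ surplus) : pvPos base surplus 0 = 0 := by
  simp [pvPos, min_eq_left hs]

theorem pvPos_succ (base surplus i : Int) (hi : 0 ≤ i) :
    pvPos base surplus (i + 1) =
      pvPos base surplus i + (if i < surplus then base + 1 else base) := by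
  unfold pvPos
  by_cases h : i < surplus
  · rw [if_pos h, min_eq_left (by omega), min_eq_left (by omega)]
    ring
  · rw [if_neg h, min_eq_right (by omega), min_eq_right (by omega)]
    ring

-- Invariant of A's second loop: after processing range(0, k), the state is
-- (the k closed-form slices, the closed-form position pvPos k).
theorem pv_second_loop (subscriptions : List Int) (base surplus : Int)
    (g : Int) (hs : 0 ≤ surplus) :
    ∀ (k : Nat), (k : Int) ≤ g →
      (PySem.List.pyRange 0 (k : Int) 1).foldl
        (fun (st : List (List Int) × Int) i =>
          let gs := PySem.List.pyGetD
            ((PySem.List.pyRange 0 g 1).map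
              (fun i => if i < surplus then base + 1 else base)) i 0
          (st.1 ++ [PySem.List.slice subscriptions (some st.2) (some (st.2 + gs))], st.2 + gs))
        ([], 0)
      = ((PySem.List.pyRange 0 (k : Int) 1).map
          (fun i => PySem.List.slice subscriptions
            (some (pvPos base surplus i))
            (some (pvPos base surplus (i + 1)))),
         pvPos base surplus (k : Int)) := by
  intro k
  induction k with
  | zero =>
    intro _
    simp [PySem.List.pyRange_one_eq_nil (le_refl 0), pvPos_zero base surplus hs]
  | succ k ih =>
    intro hk
    have hk' : (k : Int) ≤ g := by push_cast at hk ⊢; omega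
    have hrange : PySem.List.pyRange 0 ((k : Int) + 1) 1
        = PySem.List.pyRange 0 (k : Int) 1 ++ [(k : Int)] := by
      exact PySem.List.pyRange_one_succ_right (by omega)
    have hget : PySem.List.pyGetD
        ((PySem.List.pyRange 0 g 1).map
          (fun i => if i < surplus then base + 1 else base)) (k : Int) 0
        = (if (k : Int) < surplus then base + 1 else base) := by
      exact PySem.List.pyGetD_map_pyRange_of_nonneg _ g (k : Int) 0 (by omega) (by omega)
    push_cast
    rw [hrange, List.foldl_append, List.map_append, ih hk']
    simp only [List.foldl, hget]
    refine Prod.ext ?_ ?_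
    · simp [pvPos_succ base surplus (k : Int) (by omega)]
    · simp [pvPos_succ base surplus (k : Int) (by omega)]

-- ===== VERDICT (by name: the statement is the Claim_ definition above) =====
theorem even_group_split_py_spec : Claim_equal_even_group_split_py := by
  intro subscriptions groups _ hpre
  unfold Spec_even_group_split_py even_group_split_py even_group_split_py_alt
  by_cases hg : 0 < groups
  · -- positive groups: both sides are the g closed-form slices
    have hs : 0 ≤ PySem.Int.mod (subscriptions.length : Int) groups := by
      rw [PySem.Int.mod_eq_emod_of_pos hg]
      exact Int.emod_nonneg _ (by omega)
    have hfirst := pv_foldl_append_map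
      (fun i => if i < PySem.Int.mod (subscriptions.length : Int) groups then
        PySem.Int.floordiv (subscriptions.length : Int) groups + 1
      else PySem.Int.floordiv (subscriptions.length : Int) groups)
      (PySem.List.pyRange 0 groups 1) []
    simp only [List.nil_append] at hfirst
    have hk : ((groups.toNat : Nat) : Int) = groups := Int.toNat_of_nonneg (by omega)
    have := pv_second_loop subscriptions
      (PySem.Int.floordiv (subscriptions.length : Int) groups)
      (PySem.Int.mod (subscriptions.length : Int) groups)
      groups hs groups.toNat (by omega)
    rw [hk] at this
    simp only [hfirst, this]
    apply List.map_congr_left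
    intro i hi
    have hmem := (PySem.List.mem_pyRange_one).mp hi
    rfl
  · -- groups < 0 (groups ≠ 0): range(groups) is empty, both sides are []
    have : PySem.List.pyRange 0 groups 1 = [] :=
      PySem.List.pyRange_one_eq_nil (by omega)
    simp [this]
-- pvPos is definitionally i*base + min i surplus, matching B's boundaries
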